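-- pv_equiv track=rewrite | github.com/tiangong-ai/skills | eco-council-reporting/scripts/eco_council_reporting.py | missing_types_from_reason_texts
-- ===== SOURCE A (Python) =====
-- from typing import Any
--
-- def normalize_space(value: str) -> str:
--     return " ".join(str(value).split())
--
-- def maybe_text(value: Any) -> str:
--     if value is None:
--         return ""
--     return normalize_space(str(value))
--
-- def missing_types_from_reason_texts(texts: list[str]) -> list[str]:
--     missing: set[str] = set()
--     for text in texts:
--         lowered = maybe_text(text).lower()
--         if not lowered:
--             continue
--         if "station" in lowered or "pm2" in lowered or "air-quality" in lowered:
--             missing.add("station-air-quality")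
--         if "fire" in lowered or "wildfire" in lowered:
--             missing.add("fire-detection")
--         if "wind" in lowered or "humidity" in lowered or "weather" in lowered or "meteorology" in lowered:
--             missing.add("meteorology-background")
--         if "flood" in lowered or "river" in lowered or "hydrology" in lowered or "precipitation" in lowered:
--             missing.add("precipitation-hydrology")
--         if "temperature" in lowered or "heat" in lowered:
--             missing.add("temperature-extremes")
--         if "soil" in lowered or "drought" in lowered:
--             missing.add("precipitation-soil-moisture")
--         if "policy" in lowered or "comment" in lowered or "docket" in lowered:
--             missing.add("policy-comment-coverage")
--         if "public" in lowered or "discussion" in lowered or "claim" in lowered or "attributable" in lowered: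
--             missing.add("public-discussion-coverage")
--     return sorted(missing)
-- ===== SOURCE B (Python) =====
-- # Table-driven rewrite: tags listed in sorted order with their trigger keywords;
-- # one pass over the table collects matching tags already sorted (no set, no sort).
-- TAG_KEYWORDS = [
--     ("fire-detection", ("fire", "wildfire")),
--     ("meteorology-background", ("wind", "humidity", "weather", "meteorology")),
--     ("policy-comment-coverage", ("policy", "comment", "docket")),
--     ("precipitation-hydrology", ("flood", "river", "hydrology", "precipitation")),
--     ("precipitation-soil-moisture", ("soil", "drought")),
--     ("public-discussion-coverage", ("public", "discussion", "claim", "attributable")),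
--     ("station-air-quality", ("station", "pm2", "air-quality")),
--     ("temperature-extremes", ("temperature", "heat")),
-- ]
--
-- def missing_types_from_reason_texts(texts: list[str]) -> list[str]:
--     lowered = [" ".join(t.split()).lower() for t in texts]
--     return [tag for tag, keywords in TAG_KEYWORDS
--             if any(kw in low for low in lowered for kw in keywords)]
-- ===== Notes on version B (the rewrite author's own statement) =====
-- stated objective: simpler
-- what changed: Replaces A's eight literal if-branches accumulating into a set that is then sorted by a single pass over a keyword table kept in sorted tag order, so the result list is built already sorted with no set and no sort.
import Mathlib
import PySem

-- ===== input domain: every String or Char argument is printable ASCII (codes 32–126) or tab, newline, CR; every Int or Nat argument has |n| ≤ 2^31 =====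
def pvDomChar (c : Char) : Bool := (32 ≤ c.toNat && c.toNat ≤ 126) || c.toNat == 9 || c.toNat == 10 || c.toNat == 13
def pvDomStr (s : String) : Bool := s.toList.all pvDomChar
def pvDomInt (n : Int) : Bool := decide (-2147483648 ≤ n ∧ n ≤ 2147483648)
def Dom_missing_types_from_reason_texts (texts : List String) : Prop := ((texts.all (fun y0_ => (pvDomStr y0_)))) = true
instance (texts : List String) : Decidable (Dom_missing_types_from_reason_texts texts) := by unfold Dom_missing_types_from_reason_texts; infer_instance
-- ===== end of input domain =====

-- B replaces A's eight literal if-branches + set + sort by one pass over a keyword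
-- table kept in sorted tag order (objective: simpler; same substring checks).

-- ===== PORT A =====
def normalize_space (value : String) : String :=
  PySem.Str.join " " (PySem.Str.split₀ value)

def maybe_text (value : String) : String :=
  -- 'value is None' is impossible for a str argument; str(value) is the identity
  normalize_space value

def pvStepA (s : PySem.Set String) (text : String) : PySem.Set String :=
  let lowered := PySem.Str.lower (maybe_text text)
  if lowered = "" then s else
  let s := if PySem.Str.isIn "station" lowered || PySem.Str.isIn "pm2" lowered || PySem.Str.isIn "air-quality" lowered then PySem.Set.add s "station-air-quality" else s
  let s := if PySem.Str.isIn "fire" lowered || PySem.Str.isIn "wildfire" lowered then PySem.Set.add s "fire-detection" else s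
  let s := if PySem.Str.isIn "wind" lowered || PySem.Str.isIn "humidity" lowered || PySem.Str.isIn "weather" lowered || PySem.Str.isIn "meteorology" lowered then PySem.Set.add s "meteorology-background" else s
  let s := if PySem.Str.isIn "flood" lowered || PySem.Str.isIn "river" lowered || PySem.Str.isIn "hydrology" lowered || PySem.Str.isIn "precipitation" lowered then PySem.Set.add s "precipitation-hydrology" else s
  let s := if PySem.Str.isIn "temperature" lowered || PySem.Str.isIn "heat" lowered then PySem.Set.add s "temperature-extremes" else s
  let s := if PySem.Str.isIn "soil" lowered || PySem.Str.isIn "drought" lowered then PySem.Set.add s "precipitation-soil-moisture" else s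
  let s := if PySem.Str.isIn "policy" lowered || PySem.Str.isIn "comment" lowered || PySem.Str.isIn "docket" lowered then PySem.Set.add s "policy-comment-coverage" else s
  let s := if PySem.Str.isIn "public" lowered || PySem.Str.isIn "discussion" lowered || PySem.Str.isIn "claim" lowered || PySem.Str.isIn "attributable" lowered then PySem.Set.add s "public-discussion-coverage" else s
  s

def missing_types_from_reason_texts (texts : List String) : List String :=
  PySem.List.sorted (texts.foldl pvStepA PySem.Set.empty) (fun x => x) false

-- ===== PORT B =====
def TAG_KEYWORDS : List (String × List String) :=
  [ ("fire-detection", ["fire", "wildfire"]),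
    ("meteorology-background", ["wind", "humidity", "weather", "meteorology"]),
    ("policy-comment-coverage", ["policy", "comment", "docket"]),
    ("precipitation-hydrology", ["flood", "river", "hydrology", "precipitation"]),
    ("precipitation-soil-moisture", ["soil", "drought"]),
    ("public-discussion-coverage", ["public", "discussion", "claim", "attributable"]),
    ("station-air-quality", ["station", "pm2", "air-quality"]),
    ("temperature-extremes", ["temperature", "heat"]) ]

def missing_types_from_reason_texts_alt (texts : List String) : List String :=
  let lowered := texts.map (fun t => PySem.Str.lower (PySem.Str.join " " (PySem.Str.split₀ t)))
  (TAG_KEYWORDS.filter (fun p => lowered.any (fun low => p.2.any (fun kw => PySem.Str.isIn kw low)))).map Prod.fst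

-- ===== PRECONDITION & SPEC =====
def Spec_missing_types_from_reason_texts (texts : List String) (out : List String) : Prop := out = missing_types_from_reason_texts_alt texts
instance (texts : List String) (out : List String) : Decidable (Spec_missing_types_from_reason_texts texts out) := by unfold Spec_missing_types_from_reason_texts; infer_instance

-- ===== CLAIM (what is proved, stated in full; the proofs are below) =====
def Claim_equal_missing_types_from_reason_texts : Prop := ∀ (texts : List String), Dom_missing_types_from_reason_texts texts → Spec_missing_types_from_reason_texts texts (missing_types_from_reason_texts texts)

-- ===== LEMMAS AND PROOFS =====

-- the normalized, lowered text both programs match keywords against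
def pvLow (t : String) : String := PySem.Str.lower (maybe_text t)

-- does text t trigger the tag whose keyword list is kws?
def pvTrig (kws : List String) (t : String) : Bool := kws.any (fun kw => PySem.Str.isIn kw (pvLow t))

lemma mem_addIf (s : List String) (c : Prop) [Decidable c] (x a : String) :
    a ∈ (if c then PySem.Set.add s x else s) ↔ a ∈ s ∨ (x = a ∧ c) := by
  split
  · rename_i h; simp [PySem.Set.mem_add, h, eq_comm]
  · rename_i h; simp [h]

lemma nodup_addIf (s : List String) (c : Prop) [Decidable c] (x : String) (h : s.Nodup) :
    (if c then PySem.Set.add s x else s).Nodup := by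
  split
  · exact PySem.Set.nodup_add s x h
  · exact h

lemma trig_empty (t : String) (h : PySem.Str.lower (maybe_text t) = "") :
    ∀ p ∈ TAG_KEYWORDS, pvTrig p.2 t = false := by
  intro p hp
  unfold pvTrig pvLow
  rw [h]
  fin_cases hp <;> decide

lemma trigA1 (t : String) : (PySem.Str.isIn "station" (PySem.Str.lower (maybe_text t)) || PySem.Str.isIn "pm2" (PySem.Str.lower (maybe_text t)) || PySem.Str.isIn "air-quality" (PySem.Str.lower (maybe_text t))) = pvTrig ["station", "pm2", "air-quality"] t := by
  simp [pvTrig, pvLow, List.any_cons, List.any_nil, Bool.or_assoc]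

lemma trigA2 (t : String) : (PySem.Str.isIn "fire" (PySem.Str.lower (maybe_text t)) || PySem.Str.isIn "wildfire" (PySem.Str.lower (maybe_text t))) = pvTrig ["fire", "wildfire"] t := by
  simp [pvTrig, pvLow, List.any_cons, List.any_nil, Bool.or_assoc]

lemma trigA3 (t : String) : (PySem.Str.isIn "wind" (PySem.Str.lower (maybe_text t)) || PySem.Str.isIn "humidity" (PySem.Str.lower (maybe_text t)) || PySem.Str.isIn "weather" (PySem.Str.lower (maybe_text t)) || PySem.Str.isIn "meteorology" (PySem.Str.lower (maybe_text t))) = pvTrig ["wind", "humidity", "weather", "meteorology"] t := by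
  simp [pvTrig, pvLow, List.any_cons, List.any_nil, Bool.or_assoc]

lemma trigA4 (t : String) : (PySem.Str.isIn "flood" (PySem.Str.lower (maybe_text t)) || PySem.Str.isIn "river" (PySem.Str.lower (maybe_text t)) || PySem.Str.isIn "hydrology" (PySem.Str.lower (maybe_text t)) || PySem.Str.isIn "precipitation" (PySem.Str.lower (maybe_text t))) = pvTrig ["flood", "river", "hydrology", "precipitation"] t := by
  simp [pvTrig, pvLow, List.any_cons, List.any_nil, Bool.or_assoc]

lemma trigA5 (t : String) : (PySem.Str.isIn "temperature" (PySem.Str.lower (maybe_text t)) || PySem.Str.isIn "heat" (PySem.Str.lower (maybe_text t))) = pvTrig ["temperature", "heat"] t := by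
  simp [pvTrig, pvLow, List.any_cons, List.any_nil, Bool.or_assoc]

lemma trigA6 (t : String) : (PySem.Str.isIn "soil" (PySem.Str.lower (maybe_text t)) || PySem.Str.isIn "drought" (PySem.Str.lower (maybe_text t))) = pvTrig ["soil", "drought"] t := by
  simp [pvTrig, pvLow, List.any_cons, List.any_nil, Bool.or_assoc]

lemma trigA7 (t : String) : (PySem.Str.isIn "policy" (PySem.Str.lower (maybe_text t)) || PySem.Str.isIn "comment" (PySem.Str.lower (maybe_text t)) || PySem.Str.isIn "docket" (PySem.Str.lower (maybe_text t))) = pvTrig ["policy", "comment", "docket"] t := by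
  simp [pvTrig, pvLow, List.any_cons, List.any_nil, Bool.or_assoc]

lemma trigA8 (t : String) : (PySem.Str.isIn "public" (PySem.Str.lower (maybe_text t)) || PySem.Str.isIn "discussion" (PySem.Str.lower (maybe_text t)) || PySem.Str.isIn "claim" (PySem.Str.lower (maybe_text t)) || PySem.Str.isIn "attributable" (PySem.Str.lower (maybe_text t))) = pvTrig ["public", "discussion", "claim", "attributable"] t := by
  simp [pvTrig, pvLow, List.any_cons, List.any_nil, Bool.or_assoc]

set_option maxHeartbeats 1000000 in
lemma stepA_mem (s : PySem.Set String) (t a : String) :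
    a ∈ pvStepA s t ↔ a ∈ s ∨ ∃ p ∈ TAG_KEYWORDS, p.1 = a ∧ pvTrig p.2 t = true := by
  simp only [pvStepA]
  by_cases hE : PySem.Str.lower (maybe_text t) = ""
  · rw [if_pos hE]
    constructor
    · exact Or.inl
    · rintro (hs | ⟨p, hp, -, htr⟩)
      · exact hs
      · rw [trig_empty t hE p hp] at htr; cases htr
  · rw [if_neg hE]
    simp only [trigA1 t, trigA2 t, trigA3 t, trigA4 t, trigA5 t, trigA6 t, trigA7 t, trigA8 t]
    simp only [mem_addIf]
    simp only [TAG_KEYWORDS, List.mem_cons, List.not_mem_nil, or_false, exists_eq_or_imp,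
      exists_eq_left]
    constructor
    · rintro ((((((((h|h)|h)|h)|h)|h)|h)|h)|h)
      · exact Or.inl h
      · exact Or.inr (Or.inr (Or.inr (Or.inr (Or.inr (Or.inr (Or.inr (Or.inl h)))))))
      · exact Or.inr (Or.inl h)
      · exact Or.inr (Or.inr (Or.inl h))
      · exact Or.inr (Or.inr (Or.inr (Or.inr (Or.inl h))))
      · exact Or.inr (Or.inr (Or.inr (Or.inr (Or.inr (Or.inr (Or.inr (Or.inr h)))))))
      · exact Or.inr (Or.inr (Or.inr (Or.inr (Or.inr (Or.inl h)))))
      · exact Or.inr (Or.inr (Or.inr (Or.inl h)))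
      · exact Or.inr (Or.inr (Or.inr (Or.inr (Or.inr (Or.inr (Or.inl h))))))
    · rintro (h|h|h|h|h|h|h|h|h)
      · exact Or.inl (Or.inl (Or.inl (Or.inl (Or.inl (Or.inl (Or.inl (Or.inl h)))))))
      · exact Or.inl (Or.inl (Or.inl (Or.inl (Or.inl (Or.inl (Or.inr h))))))
      · exact Or.inl (Or.inl (Or.inl (Or.inl (Or.inl (Or.inr h)))))
      · exact Or.inl (Or.inr h)
      · exact Or.inl (Or.inl (Or.inl (Or.inl (Or.inr h))))
      · exact Or.inl (Or.inl (Or.inr h))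
      · exact Or.inr h
      · exact Or.inl (Or.inl (Or.inl (Or.inl (Or.inl (Or.inl (Or.inl (Or.inr h)))))))
      · exact Or.inl (Or.inl (Or.inl (Or.inr h)))

lemma stepA_nodup (s : PySem.Set String) (t : String) (h : s.Nodup) : (pvStepA s t).Nodup := by
  simp only [pvStepA]
  by_cases hE : PySem.Str.lower (maybe_text t) = ""
  · rw [if_pos hE]; exact h
  · rw [if_neg hE]
    exact nodup_addIf _ _ _ (nodup_addIf _ _ _ (nodup_addIf _ _ _ (nodup_addIf _ _ _
      (nodup_addIf _ _ _ (nodup_addIf _ _ _ (nodup_addIf _ _ _ (nodup_addIf _ _ _ h)))))))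

set_option maxHeartbeats 1600000 in
lemma foldA_mem (texts : List String) (s : PySem.Set String) (a : String) :
    a ∈ texts.foldl pvStepA s ↔ a ∈ s ∨ ∃ p ∈ TAG_KEYWORDS, p.1 = a ∧ ∃ t ∈ texts, pvTrig p.2 t = true := by
  induction texts generalizing s with
  | nil => simp
  | cons t ts ih =>
    rw [List.foldl_cons]
    rw [ih (pvStepA s t)]
    rw [stepA_mem]
    simp only [List.mem_cons]
    constructor
    · rintro ((h | ⟨p, hp, he, htr⟩) | ⟨p, hp, he, u, hu, htr⟩)
      · exact Or.inl h
      · exact Or.inr ⟨p, hp, he, t, Or.inl rfl, htr⟩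
      · exact Or.inr ⟨p, hp, he, u, Or.inr hu, htr⟩
    · rintro (h | ⟨p, hp, he, u, (rfl | hu), htr⟩)
      · exact Or.inl (Or.inl h)
      · exact Or.inl (Or.inr ⟨p, hp, he, htr⟩)
      · exact Or.inr ⟨p, hp, he, u, hu, htr⟩

set_option maxHeartbeats 1600000 in
lemma foldA_nodup (texts : List String) (s : PySem.Set String) (h : s.Nodup) :
    (texts.foldl pvStepA s).Nodup := by
  induction texts generalizing s with
  | nil => exact h
  | cons t ts ih => rw [List.foldl_cons]; exact ih _ (stepA_nodup _ _ h)

-- B's per-tag test, phrased through pvTrig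
lemma altB_any (texts : List String) (p : String × List String) :
    ((texts.map (fun t => PySem.Str.lower (PySem.Str.join " " (PySem.Str.split₀ t)))).any
      (fun low => p.2.any (fun kw => PySem.Str.isIn kw low)))
      = texts.any (fun t => pvTrig p.2 t) := by
  rw [List.any_map]
  rfl

lemma tags_pairwise : ((TAG_KEYWORDS.map Prod.fst).Pairwise (· < ·)) := by
  simp only [TAG_KEYWORDS, List.map_cons, List.map_nil, List.pairwise_cons, List.mem_cons,
    List.not_mem_nil, or_false, forall_eq_or_imp, forall_eq, List.Pairwise.nil, and_true]
  repeat' apply And.intro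
  all_goals first
    | (intro a' h; exact absurd h (by simp))
    | (rw [String.lt_iff_toList_lt]; decide)

theorem missing_types_from_reason_texts_spec : Claim_equal_missing_types_from_reason_texts := by
  intro texts _
  show missing_types_from_reason_texts texts = missing_types_from_reason_texts_alt texts
  unfold missing_types_from_reason_texts missing_types_from_reason_texts_alt
  simp only [altB_any]
  have hpair : ((TAG_KEYWORDS.filter (fun p => texts.any (fun t => pvTrig p.2 t))).map Prod.fst).Pairwise (· < ·) :=
    tags_pairwise.sublist ((TAG_KEYWORDS.filter_sublist).map Prod.fst)
  have hBnodup : ((TAG_KEYWORDS.filter (fun p => texts.any (fun t => pvTrig p.2 t))).map Prod.fst).Nodup :=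
    hpair.imp ne_of_lt
  have hSnodup : (texts.foldl pvStepA PySem.Set.empty).Nodup := foldA_nodup texts _ List.nodup_nil
  have hmem : ∀ x, x ∈ (TAG_KEYWORDS.filter (fun p => texts.any (fun t => pvTrig p.2 t))).map Prod.fst ↔
      x ∈ texts.foldl pvStepA PySem.Set.empty := by
    intro x
    rw [foldA_mem]
    simp only [PySem.Set.empty, List.not_mem_nil, false_or, List.mem_map, List.mem_filter,
      List.any_eq_true]
    constructor
    · rintro ⟨p, ⟨hp, t, ht, htr⟩, he⟩
      exact ⟨p, hp, he, t, ht, htr⟩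
    · rintro ⟨p, hp, he, t, ht, htr⟩
      exact ⟨p, ⟨hp, t, ht, htr⟩, he⟩
  exact PySem.List.sorted_eq_of_perm_of_pairwise_lt _ _ _
    ((List.perm_ext_iff_of_nodup hBnodup hSnodup).mpr hmem) hpair
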